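-- pv_equiv track=rewrite | github.com/piyush-webdev-cyber/interview-ai-simulator | backend/app/services/interview_engine.py | _default_practice_topics_for_role
-- ===== SOURCE A (Python) =====
-- def _default_practice_topics_for_role(role: str) -> list[str]:
--     role_key = role.casefold()
--     if any(token in role_key for token in ["full stack", "fullstack"]):
--         return ["API design", "database modeling", "React state management", "authentication flow", "production debugging"]
--     if any(token in role_key for token in ["frontend", "front end", "react", "web developer"]):
--         return ["component design", "state management", "accessibility", "API integration", "responsive layout"]
--     if any(token in role_key for token in ["backend", "api", "server"]):
--         return ["API contract design", "database query performance", "authorization", "background jobs", "observability"]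
--     if any(token in role_key for token in ["software", "sde", "developer", "engineer"]):
--         return ["system design basics", "debugging", "refactoring", "data modeling", "testing edge cases"]
--     if any(token in role_key for token in ["data analyst", "business analyst", "analyst"]):
--         return ["KPI definition", "root-cause analysis", "SQL analysis", "data quality", "stakeholder communication"]
--     if any(token in role_key for token in ["data scientist", "machine learning", "ml", "ai"]):
--         return ["model evaluation", "data preprocessing", "production drift", "business trade-offs", "experiment design"]
--     if any(token in role_key for token in ["devops", "cloud", "site reliability", "sre"]):
--         return ["CI/CD", "rollback strategy", "monitoring", "incident diagnosis", "secret management"]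
--     if any(token in role_key for token in ["product manager", "product owner"]):
--         return ["prioritization", "success metrics", "customer discovery", "roadmap trade-offs", "stakeholder alignment"]
--     if any(token in role_key for token in ["ux", "ui", "designer", "researcher"]):
--         return ["user research", "mobile usability", "information architecture", "design handoff", "accessibility"]
--     if any(token in role_key for token in ["qa", "quality assurance", "tester"]):
--         return ["test planning", "regression coverage", "bug reproduction", "automation strategy", "API validation"]
--     if any(token in role_key for token in ["mobile", "android", "ios", "react native"]):
--         return ["platform debugging", "offline handling", "list performance", "native permissions", "API connectivity"]
--     if any(token in role_key for token in ["cyber", "security"]):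
--         return ["suspicious login investigation", "authorization bypass", "risk communication", "secret protection", "input validation"]
--     return ["practical execution", "problem diagnosis", "quality trade-offs", "success metrics", "clear communication"]
-- ===== SOURCE B (Python) =====
-- # Priority-minimisation rewrite: one flat token->priority map, scan all tokens,
-- # take the minimum matched priority, index a topics array (12 = fallback).
-- _TOKEN_PRIORITY = {
--     "full stack": 0, "fullstack": 0,
--     "frontend": 1, "front end": 1, "react": 1, "web developer": 1,
--     "backend": 2, "api": 2, "server": 2,
--     "software": 3, "sde": 3, "developer": 3, "engineer": 3,
--     "data analyst": 4, "business analyst": 4, "analyst": 4,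
--     "data scientist": 5, "machine learning": 5, "ml": 5, "ai": 5,
--     "devops": 6, "cloud": 6, "site reliability": 6, "sre": 6,
--     "product manager": 7, "product owner": 7,
--     "ux": 8, "ui": 8, "designer": 8, "researcher": 8,
--     "qa": 9, "quality assurance": 9, "tester": 9,
--     "mobile": 10, "android": 10, "ios": 10, "react native": 10,
--     "cyber": 11, "security": 11,
-- }
--
-- _TOPIC_SETS = [
--     ["API design", "database modeling", "React state management", "authentication flow", "production debugging"],
--     ["component design", "state management", "accessibility", "API integration", "responsive layout"],
--     ["API contract design", "database query performance", "authorization", "background jobs", "observability"],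
--     ["system design basics", "debugging", "refactoring", "data modeling", "testing edge cases"],
--     ["KPI definition", "root-cause analysis", "SQL analysis", "data quality", "stakeholder communication"],
--     ["model evaluation", "data preprocessing", "production drift", "business trade-offs", "experiment design"],
--     ["CI/CD", "rollback strategy", "monitoring", "incident diagnosis", "secret management"],
--     ["prioritization", "success metrics", "customer discovery", "roadmap trade-offs", "stakeholder alignment"],
--     ["user research", "mobile usability", "information architecture", "design handoff", "accessibility"],
--     ["test planning", "regression coverage", "bug reproduction", "automation strategy", "API validation"],
--     ["platform debugging", "offline handling", "list performance", "native permissions", "API connectivity"],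
--     ["suspicious login investigation", "authorization bypass", "risk communication", "secret protection", "input validation"],
--     ["practical execution", "problem diagnosis", "quality trade-offs", "success metrics", "clear communication"],
-- ]
--
--
-- def _default_practice_topics_for_role(role: str) -> list[str]:
--     role_key = role.casefold()
--     best = min(
--         (prio for token, prio in _TOKEN_PRIORITY.items() if token in role_key),
--         default=len(_TOPIC_SETS) - 1,
--     )
--     return _TOPIC_SETS[best]
-- ===== Notes on version B (the rewrite author's own statement) =====
-- stated objective: alternative
-- what changed: Replaced A's ordered first-match if-chain over 12 token groups by a flat token-to-priority map scanned in full: B collects the minimum matched priority (default 12) and indexes a topics array with it; correctness holds because the minimum matched group index equals the first matching group in A's branch order.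
import Mathlib
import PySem

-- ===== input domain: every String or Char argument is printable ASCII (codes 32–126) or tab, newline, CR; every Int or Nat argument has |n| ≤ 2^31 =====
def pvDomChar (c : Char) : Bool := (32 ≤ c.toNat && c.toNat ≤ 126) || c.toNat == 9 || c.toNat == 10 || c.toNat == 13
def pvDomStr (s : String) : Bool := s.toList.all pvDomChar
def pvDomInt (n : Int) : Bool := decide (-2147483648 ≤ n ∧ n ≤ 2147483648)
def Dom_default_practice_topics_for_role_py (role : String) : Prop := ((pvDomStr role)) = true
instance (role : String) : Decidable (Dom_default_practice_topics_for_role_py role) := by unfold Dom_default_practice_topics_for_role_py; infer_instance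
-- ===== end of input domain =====

-- B replaces A's ordered 13-branch first-match if-chain by a flat token->priority map scanned in full,
-- taking the MINIMUM matched priority and indexing a topics array (alternative algorithm, same cost).


-- ===== PORT A =====
-- Port of A: literal if-chain; role.casefold() ported as PySem.Str.lower (exact on the ASCII domain Dom).
def default_practice_topics_for_role_py (role : String) : List String :=
  let role_key := PySem.Str.lower role
  if (["full stack", "fullstack"]).any (fun token => PySem.Str.isIn token role_key) then ["API design", "database modeling", "React state management", "authentication flow", "production debugging"] else
  if (["frontend", "front end", "react", "web developer"]).any (fun token => PySem.Str.isIn token role_key) then ["component design", "state management", "accessibility", "API integration", "responsive layout"] else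
  if (["backend", "api", "server"]).any (fun token => PySem.Str.isIn token role_key) then ["API contract design", "database query performance", "authorization", "background jobs", "observability"] else
  if (["software", "sde", "developer", "engineer"]).any (fun token => PySem.Str.isIn token role_key) then ["system design basics", "debugging", "refactoring", "data modeling", "testing edge cases"] else
  if (["data analyst", "business analyst", "analyst"]).any (fun token => PySem.Str.isIn token role_key) then ["KPI definition", "root-cause analysis", "SQL analysis", "data quality", "stakeholder communication"] else
  if (["data scientist", "machine learning", "ml", "ai"]).any (fun token => PySem.Str.isIn token role_key) then ["model evaluation", "data preprocessing", "production drift", "business trade-offs", "experiment design"] else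
  if (["devops", "cloud", "site reliability", "sre"]).any (fun token => PySem.Str.isIn token role_key) then ["CI/CD", "rollback strategy", "monitoring", "incident diagnosis", "secret management"] else
  if (["product manager", "product owner"]).any (fun token => PySem.Str.isIn token role_key) then ["prioritization", "success metrics", "customer discovery", "roadmap trade-offs", "stakeholder alignment"] else
  if (["ux", "ui", "designer", "researcher"]).any (fun token => PySem.Str.isIn token role_key) then ["user research", "mobile usability", "information architecture", "design handoff", "accessibility"] else
  if (["qa", "quality assurance", "tester"]).any (fun token => PySem.Str.isIn token role_key) then ["test planning", "regression coverage", "bug reproduction", "automation strategy", "API validation"] else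
  if (["mobile", "android", "ios", "react native"]).any (fun token => PySem.Str.isIn token role_key) then ["platform debugging", "offline handling", "list performance", "native permissions", "API connectivity"] else
  if (["cyber", "security"]).any (fun token => PySem.Str.isIn token role_key) then ["suspicious login investigation", "authorization bypass", "risk communication", "secret protection", "input validation"] else
  ["practical execution", "problem diagnosis", "quality trade-offs", "success metrics", "clear communication"]

-- ===== PORT B =====
-- Port of B: flat token -> priority map (insertion order of the Python dict), full scan, minimum matched priority.
def pvTokenPriority : List (String × Nat) := [
  ("full stack", 0), ("fullstack", 0),
  ("frontend", 1), ("front end", 1), ("react", 1), ("web developer", 1),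
  ("backend", 2), ("api", 2), ("server", 2),
  ("software", 3), ("sde", 3), ("developer", 3), ("engineer", 3),
  ("data analyst", 4), ("business analyst", 4), ("analyst", 4),
  ("data scientist", 5), ("machine learning", 5), ("ml", 5), ("ai", 5),
  ("devops", 6), ("cloud", 6), ("site reliability", 6), ("sre", 6),
  ("product manager", 7), ("product owner", 7),
  ("ux", 8), ("ui", 8), ("designer", 8), ("researcher", 8),
  ("qa", 9), ("quality assurance", 9), ("tester", 9),
  ("mobile", 10), ("android", 10), ("ios", 10), ("react native", 10),
  ("cyber", 11), ("security", 11)]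

def pvTopicSets : List (List String) := [
  ["API design", "database modeling", "React state management", "authentication flow", "production debugging"],
  ["component design", "state management", "accessibility", "API integration", "responsive layout"],
  ["API contract design", "database query performance", "authorization", "background jobs", "observability"],
  ["system design basics", "debugging", "refactoring", "data modeling", "testing edge cases"],
  ["KPI definition", "root-cause analysis", "SQL analysis", "data quality", "stakeholder communication"],
  ["model evaluation", "data preprocessing", "production drift", "business trade-offs", "experiment design"],
  ["CI/CD", "rollback strategy", "monitoring", "incident diagnosis", "secret management"],
  ["prioritization", "success metrics", "customer discovery", "roadmap trade-offs", "stakeholder alignment"],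
  ["user research", "mobile usability", "information architecture", "design handoff", "accessibility"],
  ["test planning", "regression coverage", "bug reproduction", "automation strategy", "API validation"],
  ["platform debugging", "offline handling", "list performance", "native permissions", "API connectivity"],
  ["suspicious login investigation", "authorization bypass", "risk communication", "secret protection", "input validation"],
  ["practical execution", "problem diagnosis", "quality trade-offs", "success metrics", "clear communication"]]

-- min(generator over matching priorities, default=12); _TOPIC_SETS[best] is always in range (best ≤ 12).
def default_practice_topics_for_role_py_alt (role : String) : List String :=
  let role_key := PySem.Str.lower role
  let best := (((pvTokenPriority.filter (fun p => PySem.Str.isIn p.1 role_key)).map Prod.snd).min?).getD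
      (pvTopicSets.length - 1)
  pvTopicSets.getD best []

-- ===== PRECONDITION & SPEC =====
def Spec_default_practice_topics_for_role_py (role : String) (out : List String) : Prop := out = default_practice_topics_for_role_py_alt role
instance (role : String) (out : List String) : Decidable (Spec_default_practice_topics_for_role_py role out) := by unfold Spec_default_practice_topics_for_role_py; infer_instance

-- ===== CLAIM (what is proved, stated in full; the proofs are below) =====
def Claim_equal_default_practice_topics_for_role_py : Prop := ∀ (role : String), Dom_default_practice_topics_for_role_py role → Spec_default_practice_topics_for_role_py role (default_practice_topics_for_role_py role)

-- ===== LEMMAS AND PROOFS =====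

-- groups of token lists, in A's branch order; pvTokenPriority is their flattening with group indices
def pvGroupTokens : List (List String) := [
  ["full stack", "fullstack"],
  ["frontend", "front end", "react", "web developer"],
  ["backend", "api", "server"],
  ["software", "sde", "developer", "engineer"],
  ["data analyst", "business analyst", "analyst"],
  ["data scientist", "machine learning", "ml", "ai"],
  ["devops", "cloud", "site reliability", "sre"],
  ["product manager", "product owner"],
  ["ux", "ui", "designer", "researcher"],
  ["qa", "quality assurance", "tester"],
  ["mobile", "android", "ios", "react native"],
  ["cyber", "security"]]

def pvFlatten (k : Nat) : List (List String) → List (String × Nat)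
  | [] => []
  | toks :: rest => toks.map (fun t => (t, k)) ++ pvFlatten (k + 1) rest

def pvFirstIdx (f : String → Bool) : List (List String) → Nat → Option Nat
  | [], _ => none
  | toks :: rest, k => if toks.any f then some k else pvFirstIdx f rest (k + 1)

lemma pvFlatten_snd_ge (groups : List (List String)) : ∀ (k : Nat) (p : String × Nat),
    p ∈ pvFlatten k groups → k ≤ p.2 := by
  induction groups with
  | nil => intro k p h; simp [pvFlatten] at h
  | cons toks rest ih =>
    intro k p h
    simp [pvFlatten] at h
    rcases h with ⟨t, _, rfl⟩ | h
    · simp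
    · exact Nat.le_of_succ_le (ih (k + 1) p h)

lemma pvMin_key (n k : Nat) (rest : List Nat)
    (hrest : ∀ x ∈ rest, k + 1 ≤ x) :
    (List.replicate n k ++ rest).min? = if n = 0 then rest.min? else some k := by
  by_cases h : n = 0
  · subst h; simp
  · simp only [h, if_false]
    rw [List.min?_eq_some_iff]
    constructor
    · exact List.mem_append_left _ (List.mem_replicate.mpr ⟨h, rfl⟩)
    · intro b hb
      rcases List.mem_append.mp hb with hb | hb
      · exact le_of_eq (List.eq_of_mem_replicate hb).symm
      · exact Nat.le_of_succ_le (hrest b hb)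

lemma pvMin_eq_firstIdx (f : String → Bool) (groups : List (List String)) : ∀ (k : Nat),
    (((pvFlatten k groups).filter (fun p => f p.1)).map Prod.snd).min? = pvFirstIdx f groups k := by
  induction groups with
  | nil => intro k; simp [pvFlatten, pvFirstIdx]
  | cons toks rest ih =>
    intro k
    have hmap : ((toks.map (fun t => (t, k))).filter (fun p => f p.1)).map Prod.snd
        = List.replicate (toks.filter f).length k := by
      rw [List.filter_map, List.map_map]
      show (toks.filter f).map (fun _ => k) = List.replicate (toks.filter f).length k
      simp [List.map_const']
    have hrest : ∀ x ∈ ((pvFlatten (k + 1) rest).filter (fun p => f p.1)).map Prod.snd, k + 1 ≤ x := by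
      intro x hx
      rcases List.mem_map.mp hx with ⟨p, hp, rfl⟩
      exact pvFlatten_snd_ge rest (k + 1) p (List.mem_of_mem_filter hp)
    have hany : ((toks.filter f).length = 0) = (toks.any f = false) := by
      simp [List.length_eq_zero_iff, List.filter_eq_nil_iff, List.any_eq_false]
    calc (((pvFlatten k (toks :: rest)).filter (fun p => f p.1)).map Prod.snd).min?
        = (List.replicate (toks.filter f).length k ++
            ((pvFlatten (k + 1) rest).filter (fun p => f p.1)).map Prod.snd).min? := by
          simp only [pvFlatten, List.filter_append, List.map_append, hmap]
      _ = if (toks.filter f).length = 0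
          then (((pvFlatten (k + 1) rest).filter (fun p => f p.1)).map Prod.snd).min?
          else some k := pvMin_key _ k _ hrest
      _ = pvFirstIdx f (toks :: rest) k := by
          rw [ih (k + 1)]
          simp only [pvFirstIdx, hany]
          by_cases h : toks.any f <;> simp [h]

-- ===== VERDICT (by name: the statement is the Claim_ definition above) =====
set_option maxHeartbeats 1000000 in
theorem default_practice_topics_for_role_py_spec : Claim_equal_default_practice_topics_for_role_py := by
  intro role _
  unfold Spec_default_practice_topics_for_role_py
  have halt : default_practice_topics_for_role_py_alt role
      = pvTopicSets.getD
          ((pvFirstIdx (fun t => PySem.Str.isIn t (PySem.Str.lower role)) pvGroupTokens 0).getD 12) [] := by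
    exact congrArg (fun b => pvTopicSets.getD b [])
      (congrArg (fun o => Option.getD o (pvTopicSets.length - 1))
        (pvMin_eq_firstIdx (fun t => PySem.Str.isIn t (PySem.Str.lower role)) pvGroupTokens 0))
  rw [halt]
  unfold default_practice_topics_for_role_py
  simp only [pvGroupTokens, pvFirstIdx]
  simp only [apply_ite (fun o : Option Nat => pvTopicSets.getD (o.getD 12) []),
    Option.getD_some, Option.getD_none]
  norm_num [pvTopicSets]
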